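-- pv_equiv track=rewrite | github.com/df1903/problem_solving_python | gaming_array.py | gaming_array
-- ===== SOURCE A (Python) =====
-- def gaming_array(arr: list[int]) -> str:
--     num: int = arr[0]
--     n: int = 0
--     for i in arr:
--         if i > num:
--             n = n + 1
--             num = i
--
--     if n % 2 == 0:
--         return 'BOB'
--     else:
--         return 'ANDY'
-- ===== SOURCE B (Python) =====
-- def gaming_array(arr: list[int]) -> str:
--     first = arr[0]
--     # pass 1: build the prefix-maximum table
--     prefix = []
--     cur = first
--     for x in arr:
--         cur = max(cur, x)
--         prefix.append(cur)
--     # pass 2: the table is non-decreasing, so the number of new maxima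
--     # is the number of distinct values in it minus one
--     count = len(set(prefix)) - 1
--     return 'BOB' if count % 2 == 0 else 'ANDY'
-- ===== Notes on version B (the rewrite author's own statement) =====
-- stated objective: alternative
-- what changed: Replaces A's online scan with a counter and running max by a two-pass pipeline: build the prefix-maximum table, then count new maxima as the number of distinct values in that table minus one.
import Mathlib
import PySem

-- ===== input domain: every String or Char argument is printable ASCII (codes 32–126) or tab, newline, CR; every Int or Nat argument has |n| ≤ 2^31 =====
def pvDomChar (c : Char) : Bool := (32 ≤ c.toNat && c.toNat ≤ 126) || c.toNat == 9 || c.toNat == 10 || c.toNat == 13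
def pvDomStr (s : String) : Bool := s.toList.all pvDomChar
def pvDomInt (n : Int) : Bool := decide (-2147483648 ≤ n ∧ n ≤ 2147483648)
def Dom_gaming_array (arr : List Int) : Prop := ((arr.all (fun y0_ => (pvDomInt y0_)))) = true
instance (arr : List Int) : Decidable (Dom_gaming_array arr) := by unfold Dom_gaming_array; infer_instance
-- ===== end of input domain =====

-- B builds the prefix-maximum table and counts its distinct values; A keeps a running counter in one scan.

-- ===== PORT A =====
def gaming_array (arr : List Int) : String :=
  let num : Int := (PySem.List.pyGet? arr 0).getD 0   -- arr[0]; none (IndexError) excluded by Pre_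
  let st := arr.foldl (fun p i => if i > p.2 then (p.1 + 1, i) else p) ((0 : Int), num)
  if st.1 % 2 == 0 then "BOB" else "ANDY"

-- ===== PORT B =====
def gaming_array_alt (arr : List Int) : String :=
  let first : Int := (PySem.List.pyGet? arr 0).getD 0   -- arr[0]; none (IndexError) excluded by Pre_
  -- pass 1: prefix-maximum table
  let st := arr.foldl (fun p x => let c := max p.1 x; (c, p.2 ++ [c])) (first, ([] : List Int))
  -- pass 2: distinct values in the table, minus one
  let count : Int := (PySem.Set.len (PySem.Set.ofList st.2) : Int) - 1
  if count % 2 == 0 then "BOB" else "ANDY"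

-- ===== PRECONDITION & SPEC =====
-- A evaluates arr[0], which raises IndexError on the empty list; Pre_ excludes exactly that input.
def Pre_gaming_array (arr : List Int) : Prop := arr ≠ []
instance (arr : List Int) : Decidable (Pre_gaming_array arr) := by unfold Pre_gaming_array; infer_instance
def pvWitness_gaming_array : List Int := [3, 1, 4]

def Spec_gaming_array (arr : List Int) (out : String) : Prop := out = gaming_array_alt arr
instance (arr : List Int) (out : String) : Decidable (Spec_gaming_array arr out) := by unfold Spec_gaming_array; infer_instance

-- ===== CLAIM (what is proved, stated in full; the proofs are below) =====
def Claim_equal_gaming_array : Prop := ∀ (arr : List Int), Dom_gaming_array arr → Pre_gaming_array arr → Spec_gaming_array arr (gaming_array arr)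

-- ===== LEMMAS AND PROOFS =====

-- number of strict increases of the running maximum m along a list
def pvCountNew (m : Int) : List Int → Nat
  | [] => 0
  | x :: xs => if m < x then pvCountNew x xs + 1 else pvCountNew m xs

-- the prefix-maximum sequence starting from running maximum m
def pvPrefixMax (m : Int) : List Int → List Int
  | [] => []
  | x :: xs => max m x :: pvPrefixMax (max m x) xs

theorem pvA_fold (l : List Int) : ∀ (m k : Int),
    (l.foldl (fun p i => if i > p.2 then (p.1 + 1, i) else p) (k, m)).1 = k + pvCountNew m l := by
  induction l with
  | nil => intro m k; simp [pvCountNew]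
  | cons x xs ih =>
    intro m k
    by_cases h : m < x
    · simp [List.foldl_cons, pvCountNew, h, ih]; ring
    · have h' : ¬ x > m := h
      simp [List.foldl_cons, pvCountNew, h, ih]

theorem pvB_fold (l : List Int) : ∀ (m : Int) (acc : List Int),
    (l.foldl (fun p x => let c := max p.1 x; (c, p.2 ++ [c])) (m, acc)).2 = acc ++ pvPrefixMax m l := by
  induction l with
  | nil => intro m acc; simp [pvPrefixMax]
  | cons x xs ih =>
    intro m acc
    simp [List.foldl_cons, pvPrefixMax, ih]

theorem pvSet_len (l : List Int) : ∀ (s : PySem.Set Int) (m : Int),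
    m ∈ s → (∀ y ∈ s, y ≤ m) →
    ((pvPrefixMax m l).foldl PySem.Set.add s).length = s.length + pvCountNew m l := by
  induction l with
  | nil => intro s m _ _; simp [pvPrefixMax, pvCountNew]
  | cons x xs ih =>
    intro s m hm hle
    by_cases h : m < x
    · have hmax : max m x = x := by omega
      have hnot : x ∉ s := fun hx => absurd (hle x hx) (by omega)
      have hadd : PySem.Set.add s x = s ++ [x] := by
        simp [PySem.Set.add, PySem.Set.contains, hnot]
      have hmem : x ∈ s ++ [x] := by simp
      have hle' : ∀ y ∈ s ++ [x], y ≤ x := by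
        intro y hy
        rcases List.mem_append.mp hy with hy | hy
        · exact le_trans (hle y hy) (by omega)
        · simp at hy; omega
      simp only [pvPrefixMax, hmax, List.foldl_cons, hadd]
      rw [ih (s ++ [x]) x hmem hle']
      simp [pvCountNew, h]
      omega
    · have hmax : max m x = m := by omega
      have hadd : PySem.Set.add s m = s := by
        simp [PySem.Set.add, PySem.Set.contains, hm]
      simp only [pvPrefixMax, hmax, List.foldl_cons, hadd]
      rw [ih s m hm hle]
      simp [pvCountNew, h]

-- ===== VERDICT (by name: the statement is the Claim_ definition above) =====
theorem gaming_array_spec : Claim_equal_gaming_array := by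
  intro arr _ hpre
  unfold Spec_gaming_array gaming_array gaming_array_alt
  cases arr with
  | nil => exact absurd rfl hpre
  | cons a xs =>
    rw [PySem.List.pyGet?_zero_cons]
    simp only [Option.getD_some]
    -- A's count
    have hA : ((a :: xs).foldl (fun p i => if i > p.2 then (p.1 + 1, i) else p) ((0 : Int), a)).1
        = (pvCountNew a xs : Int) := by
      have : ¬ a > a := lt_irrefl a
      simp only [List.foldl_cons, this]
      simpa using pvA_fold xs a 0
    -- B's table
    have hB : ((a :: xs).foldl (fun p x => (max p.1 x, p.2 ++ [max p.1 x])) (a, ([] : List Int))).2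
        = a :: pvPrefixMax a xs := by
      have hmax : max a a = a := max_self a
      simp only [List.foldl_cons]
      simpa [hmax] using pvB_fold xs a [a]
    -- distinct count of the table
    have hS : (PySem.Set.ofList (a :: pvPrefixMax a xs)).length = 1 + pvCountNew a xs := by
      have h1 : PySem.Set.ofList (a :: pvPrefixMax a xs)
          = (pvPrefixMax a xs).foldl PySem.Set.add (PySem.Set.add PySem.Set.empty a) := by
        simp [PySem.Set.ofList_eq_foldl]
      have h2 : PySem.Set.add PySem.Set.empty a = [a] := by
        simp [PySem.Set.add, PySem.Set.contains, PySem.Set.empty]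
      rw [h1, h2, pvSet_len xs [a] a (by simp) (by simp)]
      simp
    have hcast : ((1 + pvCountNew a xs : Nat) : Int) - 1 = (pvCountNew a xs : Int) := by
      push_cast; ring
    simp only [hA, hB, PySem.Set.len, hS, hcast]
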